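-- pv_equiv track=rewrite | github.com/chuksoo/CodeMasters | TIP102 - Intermediate Technical Interview Prep/Unit 2 practice.py | schedule_pattern
-- ===== SOURCE A (Python) =====
-- def schedule_pattern(pattern, schedule):
--
--     genres = schedule.split()
--     pattern = list(pattern)
--
--     # if len(genres) == len(pattern):
--     #     return True
--
--     char_to_genre = {}
--     genre_to_char = {}
--
--     for char, genre in zip(pattern, genres):
--         if char in char_to_genre:
--             if char_to_genre[char] != genre:
--                 return False
--         else:
--             char_to_genre[char] = genre
--
--         if genre in genre_to_char:
--             if genre_to_char[genre] != char:
--                 return False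
--         else:
--             genre_to_char[genre] = char
--     return True
-- ===== SOURCE B (Python) =====
-- def schedule_pattern(pattern, schedule):
--     pairs = list(zip(pattern, schedule.split()))
--     return all((c1 == c2) == (g1 == g2) for c1, g1 in pairs for c2, g2 in pairs)
-- ===== Notes on version B (the rewrite author's own statement) =====
-- stated objective: simpler
-- what changed: Replaces the two incrementally built forward/backward dictionaries and early returns with a single pairwise all(): bijectivity of the zipped (char, genre) pairs is checked by requiring char-equality and genre-equality to coincide for every pair of pairs.
import Mathlib
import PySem

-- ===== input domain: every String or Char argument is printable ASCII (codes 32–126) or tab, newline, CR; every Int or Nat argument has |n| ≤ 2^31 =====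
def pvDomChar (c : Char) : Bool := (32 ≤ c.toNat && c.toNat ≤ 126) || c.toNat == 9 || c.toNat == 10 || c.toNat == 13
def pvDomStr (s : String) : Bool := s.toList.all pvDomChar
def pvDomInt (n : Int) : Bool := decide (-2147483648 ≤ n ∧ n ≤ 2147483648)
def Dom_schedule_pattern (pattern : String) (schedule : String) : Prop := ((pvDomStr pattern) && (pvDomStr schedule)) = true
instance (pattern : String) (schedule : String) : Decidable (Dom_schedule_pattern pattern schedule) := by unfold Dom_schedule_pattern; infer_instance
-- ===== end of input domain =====

-- B replaces A's two incrementally built dictionaries and early returns with a single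
-- pairwise all() over the zipped (char, genre) pairs; objective: simpler, same results.


-- ===== PORT A =====
-- A's loop over zip(pattern, genres), carrying the two dicts; early `return False`
-- becomes returning `false` from the recursion.
def scheduleLoopA (c2g : PySem.Dict Char String) (g2c : PySem.Dict String Char) :
    List (Char × String) → Bool
  | [] => true
  | (char, genre) :: rest =>
    -- `if char in char_to_genre: if != → return False  else: insert`
    match c2g.get? char with
    | some g' =>
      if g' != genre then false
      else
        match g2c.get? genre with
        | some c' => if c' != char then false else scheduleLoopA c2g g2c rest
        | none => scheduleLoopA c2g (g2c.insert genre char) rest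
    | none =>
      let c2g' := c2g.insert char genre
      match g2c.get? genre with
      | some c' => if c' != char then false else scheduleLoopA c2g' g2c rest
      | none => scheduleLoopA c2g' (g2c.insert genre char) rest

def schedule_pattern (pattern : String) (schedule : String) : Bool :=
  let genres := PySem.Str.split₀ schedule
  let patternL := pattern.toList
  scheduleLoopA PySem.Dict.empty PySem.Dict.empty (patternL.zip genres)

-- ===== PORT B =====
def schedule_pattern_alt (pattern : String) (schedule : String) : Bool :=
  let pairs := pattern.toList.zip (PySem.Str.split₀ schedule)
  pairs.all (fun p => pairs.all (fun q => (p.1 == q.1) == (p.2 == q.2)))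

-- ===== PRECONDITION & SPEC =====
def Spec_schedule_pattern (pattern : String) (schedule : String) (out : Bool) : Prop := out = schedule_pattern_alt pattern schedule
instance (pattern : String) (schedule : String) (out : Bool) : Decidable (Spec_schedule_pattern pattern schedule out) := by unfold Spec_schedule_pattern; infer_instance

-- ===== CLAIM (what is proved, stated in full; the proofs are below) =====
def Claim_equal_schedule_pattern : Prop := ∀ (pattern : String) (schedule : String), Dom_schedule_pattern pattern schedule → Spec_schedule_pattern pattern schedule (schedule_pattern pattern schedule)

-- ===== LEMMAS AND PROOFS =====

-- the bijectivity property both programs decide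
def Consistent (l : List (Char × String)) : Prop :=
  ∀ p ∈ l, ∀ q ∈ l, (p.1 = q.1 ↔ p.2 = q.2)

-- the two dicts are exactly the graph of a consistent processed prefix
def InvC (pre : List (Char × String)) (c2g : PySem.Dict Char String) : Prop :=
  ∀ c g, c2g.get? c = some g ↔ (c, g) ∈ pre
def InvG (pre : List (Char × String)) (g2c : PySem.Dict String Char) : Prop :=
  ∀ c g, g2c.get? g = some c ↔ (c, g) ∈ pre

lemma consistent_nil : Consistent [] := by intro p hp; cases hp

lemma consistent_sub {l₁ l₂ : List (Char × String)} (h : Consistent l₂)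
    (hsub : ∀ p ∈ l₁, p ∈ l₂) : Consistent l₁ := by
  intro p hp q hq; exact h p (hsub p hp) q (hsub q hq)

lemma invC_extend {pre : List (Char × String)} {c2g : PySem.Dict Char String}
    (hC : InvC pre c2g) {c : Char} {g : String} (hmem : (c, g) ∈ pre) :
    InvC (pre ++ [(c, g)]) c2g := by
  intro x y
  rw [hC x y]
  constructor
  · intro h; exact List.mem_append_left _ h
  · intro h
    rcases List.mem_append.mp h with h | h
    · exact h
    · simp only [List.mem_singleton, Prod.mk.injEq] at h
      obtain ⟨rfl, rfl⟩ := h; exact hmem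

lemma invG_extend {pre : List (Char × String)} {g2c : PySem.Dict String Char}
    (hG : InvG pre g2c) {c : Char} {g : String} (hmem : (c, g) ∈ pre) :
    InvG (pre ++ [(c, g)]) g2c := by
  intro x y
  rw [hG x y]
  constructor
  · intro h; exact List.mem_append_left _ h
  · intro h
    rcases List.mem_append.mp h with h | h
    · exact h
    · simp only [List.mem_singleton, Prod.mk.injEq] at h
      obtain ⟨rfl, rfl⟩ := h; exact hmem

lemma invC_extend_insert {pre : List (Char × String)} {c2g : PySem.Dict Char String}
    (hC : InvC pre c2g) {c : Char} {g : String} (hnone : c2g.get? c = none) :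
    InvC (pre ++ [(c, g)]) (c2g.insert c g) := by
  intro x y
  rw [PySem.Dict.get?_insert]
  by_cases hx : x = c
  · subst hx
    rw [if_pos rfl]
    constructor
    · intro h; injection h with h; subst h; simp
    · intro h
      rcases List.mem_append.mp h with h | h
      · exact absurd ((hC x y).mpr h) (by simp [hnone])
      · simp only [List.mem_singleton, Prod.mk.injEq] at h
        rw [h.2]
  · simp only [if_neg hx]
    rw [hC x y]
    constructor
    · intro h; exact List.mem_append_left _ h
    · intro h
      rcases List.mem_append.mp h with h | h
      · exact h
      · simp only [List.mem_singleton, Prod.mk.injEq] at h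
        exact absurd h.1 hx

lemma invG_extend_insert {pre : List (Char × String)} {g2c : PySem.Dict String Char}
    (hG : InvG pre g2c) {c : Char} {g : String} (hnone : g2c.get? g = none) :
    InvG (pre ++ [(c, g)]) (g2c.insert g c) := by
  intro x y
  rw [PySem.Dict.get?_insert]
  by_cases hy : y = g
  · subst hy
    rw [if_pos rfl]
    constructor
    · intro h; injection h with h; subst h; simp
    · intro h
      rcases List.mem_append.mp h with h | h
      · exact absurd ((hG x y).mpr h) (by simp [hnone])
      · simp only [List.mem_singleton, Prod.mk.injEq] at h
        rw [h.1]
  · simp only [if_neg hy]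
    rw [hG x y]
    constructor
    · intro h; exact List.mem_append_left _ h
    · intro h
      rcases List.mem_append.mp h with h | h
      · exact h
      · simp only [List.mem_singleton, Prod.mk.injEq] at h
        exact absurd h.2 hy

lemma loopA_iff (l : List (Char × String)) :
    ∀ (pre : List (Char × String)) (c2g : PySem.Dict Char String)
      (g2c : PySem.Dict String Char),
      Consistent pre → InvC pre c2g → InvG pre g2c →
      (scheduleLoopA c2g g2c l = true ↔ Consistent (pre ++ l)) := by
  induction l with
  | nil =>
    intro pre c2g g2c hcons _ _
    simp [scheduleLoopA, hcons]
  | cons hd tl ih =>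
    intro pre c2g g2c hcons hC hG
    obtain ⟨c, g⟩ := hd
    rw [show pre ++ (c, g) :: tl = (pre ++ [(c, g)]) ++ tl by simp]
    cases hc : c2g.get? c with
    | some g' =>
      simp only [scheduleLoopA, hc]
      have hmemC : (c, g') ∈ pre := (hC c g').mp hc
      by_cases hgg : g' = g
      · rw [if_neg (by simp [hgg])]
        have hmemC' : (c, g) ∈ pre := hgg ▸ hmemC
        have hpre' : Consistent (pre ++ [(c, g)]) :=
          consistent_sub hcons (by
            intro p hp
            rcases List.mem_append.mp hp with h | h
            · exact h
            · simp only [List.mem_singleton] at h; subst h; exact hmemC')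
        have hC' : InvC (pre ++ [(c, g)]) c2g := invC_extend hC hmemC'
        cases hg : g2c.get? g with
        | some c' =>
          simp only []
          have hmemG : (c', g) ∈ pre := (hG c' g).mp hg
          by_cases hcc : c' = c
          · rw [if_neg (by simp [hcc])]
            exact ih _ c2g g2c hpre' hC' (invG_extend hG (hcc ▸ hmemG))
          · rw [if_pos (show (c' != c) = true by simp [hcc])]
            constructor
            · intro h; exact absurd h (by simp)
            · intro h
              have := h (c', g) (List.mem_append_left _ (List.mem_append_left _ hmemG))
                (c, g) (by simp)
              exact absurd (this.mpr rfl) hcc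
        | none =>
          simp only []
          exact ih _ c2g (g2c.insert g c) hpre' hC' (invG_extend_insert hG hg)
      · rw [if_pos (show (g' != g) = true by simp [hgg])]
        constructor
        · intro h; exact absurd h (by simp)
        · intro h
          have := h (c, g') (List.mem_append_left _ (List.mem_append_left _ hmemC))
            (c, g) (by simp)
          exact absurd (this.mp rfl) hgg
    | none =>
      simp only [scheduleLoopA, hc]
      have hnotin : ∀ b, (c, b) ∉ pre := fun b hb =>
        absurd ((hC c b).mpr hb) (by simp [hc])
      have hC' : InvC (pre ++ [(c, g)]) (c2g.insert c g) := invC_extend_insert hC hc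
      cases hg : g2c.get? g with
      | some c' =>
        simp only []
        have hmemG : (c', g) ∈ pre := (hG c' g).mp hg
        have hcc : c' ≠ c := fun h => hnotin g (h ▸ hmemG)
        rw [if_pos (show (c' != c) = true by simp [hcc])]
        constructor
        · intro h; exact absurd h (by simp)
        · intro h
          have := h (c', g) (List.mem_append_left _ (List.mem_append_left _ hmemG))
            (c, g) (by simp)
          exact absurd (this.mpr rfl) hcc
      | none =>
        simp only []
        have hnoting : ∀ a, (a, g) ∉ pre := fun a ha =>
          absurd ((hG a g).mpr ha) (by simp [hg])
        have hpre' : Consistent (pre ++ [(c, g)]) := by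
          intro p hp q hq
          simp only [List.mem_append, List.mem_singleton] at hp hq
          rcases hp with hp | hp <;> rcases hq with hq | hq
          · exact hcons p hp q hq
          · subst hq
            have hp' : (p.1, p.2) ∈ pre := by simpa using hp
            constructor
            · intro h; exact absurd ((show p.1 = c from h) ▸ hp') (hnotin p.2)
            · intro h; exact absurd ((show p.2 = g from h) ▸ hp') (hnoting p.1)
          · subst hp
            have hq' : (q.1, q.2) ∈ pre := by simpa using hq
            constructor
            · intro h; exact absurd ((show q.1 = c from h.symm) ▸ hq') (hnotin q.2)
            · intro h; exact absurd ((show q.2 = g from h.symm) ▸ hq') (hnoting q.1)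
          · subst hp; subst hq; simp
        exact ih _ (c2g.insert c g) (g2c.insert g c) hpre' hC' (invG_extend_insert hG hg)

lemma altAll_iff (pairs : List (Char × String)) :
    (pairs.all (fun p => pairs.all (fun q => (p.1 == q.1) == (p.2 == q.2))) = true)
      ↔ Consistent pairs := by
  simp only [List.all_eq_true, Consistent]
  constructor
  · intro h p hp q hq
    have h2 : (p.1 == q.1) = (p.2 == q.2) := by simpa using h p hp q hq
    constructor
    · intro e; exact beq_iff_eq.mp (h2 ▸ (beq_iff_eq.mpr e))
    · intro e; exact beq_iff_eq.mp (h2.symm ▸ (beq_iff_eq.mpr e))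
  · intro h p hp q hq
    have hiff := h p hp q hq
    by_cases h1 : p.1 = q.1
    · simp [h1, hiff.mp h1]
    · have h2 : p.2 ≠ q.2 := fun hh => h1 (hiff.mpr hh)
      simp [h1, h2]

-- ===== VERDICT (by name: the statement is the Claim_ definition above) =====
theorem schedule_pattern_spec : Claim_equal_schedule_pattern := by
  intro pattern schedule _
  unfold Spec_schedule_pattern schedule_pattern schedule_pattern_alt
  have hA := loopA_iff (pattern.toList.zip (PySem.Str.split₀ schedule)) []
    PySem.Dict.empty PySem.Dict.empty consistent_nil
    (by intro c g; simp [PySem.Dict.get?_empty])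
    (by intro c g; simp [PySem.Dict.get?_empty])
  have hB := altAll_iff (pattern.toList.zip (PySem.Str.split₀ schedule))
  simp only [List.nil_append] at hA
  rw [Bool.eq_iff_iff, hA, hB]
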